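-- pv_equiv track=rewrite | github.com/elecbrick/explainusb | packet.py | crc5
-- ===== SOURCE A (Python) =====
-- def xor(x, y):
--     # perform xor on two lists or strings of the same length
--     assert len(x)==len(y)
--     result = []
--     for i in range(0,len(x)):
--         if x[i]==y[i]:
--             result.append('0')
--         else:
--             result.append('1')
--     return result
--
-- def crc5(bitstring):
--     # Input:  bitstring, length=11
--     # Output: bitstring, length=5
--     #logger.debug(f"Calculating CRC5 of {bitstring}")
--     G5 = ('0','0','1','0','1')  # 0x14
--     crc = ['1','1','1','1','1'] # 0x1F
--     data = list(bitstring)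
--     while (len(data)>0):
--         nextb=data.pop(0);
--         if nextb!='0' and nextb!='1':
--             continue  # ignore invalid characters
--         if nextb == crc.pop(0):
--             crc.append('0')
--         else:
--             crc.append('0')
--             crc=xor(crc, G5)
--     # invert shift reg contents to produce final crc value
--     bitstring=""
--     for nextb in crc:
--         bitstring+=chr(ord(nextb)^1)
--     #logger.debug(f"Calculated CRC5 is {bitstring}")
--     return bitstring
-- ===== SOURCE B (Python) =====
-- # CRC-5/USB via GF(2) linearity: the final shift-register value equals
-- # init*x^n + sum_i bit_i * x^(n+4-i)  (mod G, G = x^5+x^2+1), and x^k mod G is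
-- # periodic with period 31, so each bit contributes an independent table XOR.
--
-- _POW = []
-- _p = 1
-- for _ in range(31):
--     _POW.append(_p)
--     _p = ((_p << 1) & 0x1F) ^ (0x05 if _p & 0x10 else 0)
--
--
-- def crc5(bitstring):
--     bits = [c for c in bitstring if c == '0' or c == '1']
--     n = len(bits)
--     reg = 0
--     for j in range(5):
--         reg ^= _POW[(n + j) % 31]
--     for i, c in enumerate(bits):
--         if c == '1':
--             reg ^= _POW[(n + 4 - i) % 31]
--     reg ^= 0x1F
--     return ''.join('1' if reg >> i & 1 else '0' for i in range(4, -1, -1))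
-- ===== Notes on version B (the rewrite author's own statement) =====
-- stated objective: faster
-- what changed: B drops A's serial feedback shift register entirely: using GF(2) linearity of CRC, each data bit contributes an independent XOR from a precomputed period-31 table of powers of x mod G, so the result is init times x^n plus one table lookup per set data bit, with no state carried between bits (A instead mutates a 5-char list with data.pop(0) per character).
import Mathlib
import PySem

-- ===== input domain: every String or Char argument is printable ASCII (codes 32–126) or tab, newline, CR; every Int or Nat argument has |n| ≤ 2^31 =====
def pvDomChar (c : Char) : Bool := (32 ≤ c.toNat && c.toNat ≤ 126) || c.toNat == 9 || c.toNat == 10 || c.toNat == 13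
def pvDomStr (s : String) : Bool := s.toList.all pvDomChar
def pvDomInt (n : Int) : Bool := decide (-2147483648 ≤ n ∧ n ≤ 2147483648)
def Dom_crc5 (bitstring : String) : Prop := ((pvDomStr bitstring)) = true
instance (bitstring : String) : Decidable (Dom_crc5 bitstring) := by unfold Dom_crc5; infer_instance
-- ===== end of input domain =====

-- B drops A's serial feedback shift register: by GF(2) linearity each data bit contributes an
-- independent XOR from a period-31 table of x^k mod G; measured faster (A's data.pop(0) is quadratic).

-- ===== PORT A =====
-- xor helper of A: loops over indices; in A's use both lists always have equal length and
-- every index is in range, so pyGetD's default ' ' is never produced (exact).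
def crc5Xor (x y : List Char) : List Char :=
  (PySem.List.pyRange 0 (Int.ofNat x.length) 1).foldl
    (fun result i =>
      result ++ [if PySem.List.pyGetD x i ' ' == PySem.List.pyGetD y i ' ' then '0' else '1']) []

def crc5G5 : List Char := ['0', '0', '1', '0', '1']

-- the while-loop: pops data front; crc.pop(0) modelled by headD/tail (crc always has length 5,
-- so pop(0) never raises and headD's default is never produced: exact).
def crc5Loop : List Char → List Char → List Char
  | [], crc => crc
  | nextb :: data, crc =>
      if nextb ≠ '0' ∧ nextb ≠ '1' then crc5Loop data crc
      else crc5Loop data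
        (if nextb == crc.headD ' ' then crc.tail ++ ['0']
         else crc5Xor (crc.tail ++ ['0']) crc5G5)

def crc5 (bitstring : String) : String :=
  let crc := crc5Loop bitstring.toList ['1', '1', '1', '1', '1']
  -- final loop: bitstring += chr(ord(nextb)^1)
  String.ofList (crc.foldl (fun acc nextb => acc ++ [Char.ofNat (nextb.toNat ^^^ 1)]) [])

-- ===== PORT B =====
-- module-level table build of Source B: _POW, 31 powers of x mod G
def crc5Pow : List Nat :=
  ((PySem.List.pyRange 0 31 1).foldl
    (fun (st : List Nat × Nat) _ =>
      (st.1 ++ [st.2], ((st.2 <<< 1) &&& 0x1F) ^^^ (if st.2 &&& 0x10 ≠ 0 then 0x05 else 0)))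
    ([], 1)).1

def crc5_alt (bitstring : String) : String :=
  let bits := bitstring.toList.filter (fun c => c == '0' || c == '1')
  let n : Int := bits.length
  -- _POW[(n+j)%31]: index is always in [0,31), so pyGetD's default 0 is never produced (exact)
  let reg := (PySem.List.pyRange 0 5 1).foldl
    (fun reg j => reg ^^^ PySem.List.pyGetD crc5Pow (PySem.Int.mod (n + j) 31) 0) 0
  let reg := (PySem.List.enumerate bits 0).foldl
    (fun reg ic => if ic.2 == '1' then reg ^^^ PySem.List.pyGetD crc5Pow (PySem.Int.mod (n + 4 - ic.1) 31) 0 else reg) reg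
  let reg := reg ^^^ 0x1F
  -- ''.join(... for i in range(4, -1, -1)); i ≥ 0 throughout so i.toNat is exact
  String.ofList ((PySem.List.pyRange 4 (-1) (-1)).map
    (fun i => if (reg >>> i.toNat) &&& 1 == 1 then '1' else '0'))

-- ===== PRECONDITION & SPEC =====
def Spec_crc5 (bitstring : String) (out : String) : Prop := out = crc5_alt bitstring
instance (bitstring : String) (out : String) : Decidable (Spec_crc5 bitstring out) := by unfold Spec_crc5; infer_instance

-- ===== CLAIM (what is proved, stated in full; the proofs are below) =====
def Claim_equal_crc5 : Prop := ∀ (bitstring : String), Dom_crc5 bitstring → Spec_crc5 bitstring (crc5 bitstring)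

-- ===== LEMMAS AND PROOFS =====

-- multiplication by x modulo G = x^5+x^2+1 on a 5-bit register
def mulx (n : Nat) : Nat := ((n <<< 1) &&& 0x1F) ^^^ (if n &&& 0x10 ≠ 0 then 0x05 else 0)

-- serial CRC step on the integer register, A's algorithm in integer form
def stepc (r : Nat) (c : Char) : Nat :=
  if c ≠ '0' ∧ c ≠ '1' then r else mulx r ^^^ (if c == '1' then 5 else 0)

-- step on a valid (filtered) bit character
def stepb (r : Nat) (c : Char) : Nat := mulx r ^^^ (if c == '1' then 5 else 0)

-- the data contribution: each bit, multiplied by x^(remaining length)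
def Cfun : List Char → Nat
  | [] => 0
  | c :: bs => mulx^[bs.length] (if c == '1' then 5 else 0) ^^^ Cfun bs

-- the 5-bit register n rendered as A's char list, MSB first
def bits5 (n : Nat) : List Char :=
  [if (n >>> 4) &&& 1 == 1 then '1' else '0',
   if (n >>> 3) &&& 1 == 1 then '1' else '0',
   if (n >>> 2) &&& 1 == 1 then '1' else '0',
   if (n >>> 1) &&& 1 == 1 then '1' else '0',
   if (n >>> 0) &&& 1 == 1 then '1' else '0']

lemma mulx_facts : ∀ a b : Fin 32,
    mulx (a.val ^^^ b.val) = mulx a.val ^^^ mulx b.val ∧ (a.val ^^^ b.val) < 32 ∧ mulx a.val < 32 := by decide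

lemma mulx_per : ∀ a : Fin 32, mulx^[31] a.val = a.val := by decide

lemma mulx_lt' (a : Nat) (ha : a < 32) : mulx a < 32 := (mulx_facts ⟨a, ha⟩ ⟨a, ha⟩).2.2
lemma xor_lt' (a b : Nat) (ha : a < 32) (hb : b < 32) : a ^^^ b < 32 := (mulx_facts ⟨a, ha⟩ ⟨b, hb⟩).2.1
lemma mulx_xor' (a b : Nat) (ha : a < 32) (hb : b < 32) : mulx (a ^^^ b) = mulx a ^^^ mulx b := (mulx_facts ⟨a, ha⟩ ⟨b, hb⟩).1
lemma mulx_per' (a : Nat) (ha : a < 32) : mulx^[31] a = a := mulx_per ⟨a, ha⟩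

lemma iter_lt (k a : Nat) (ha : a < 32) : mulx^[k] a < 32 := by
  induction k generalizing a with
  | zero => simpa using ha
  | succ k ih =>
    rw [Function.iterate_succ_apply]
    exact ih _ (mulx_lt' a ha)

lemma iter_xor (k a b : Nat) (ha : a < 32) (hb : b < 32) :
    mulx^[k] (a ^^^ b) = mulx^[k] a ^^^ mulx^[k] b := by
  induction k generalizing a b with
  | zero => simp
  | succ k ih =>
    rw [Function.iterate_succ_apply, Function.iterate_succ_apply, Function.iterate_succ_apply,
      mulx_xor' a b ha hb]
    exact ih _ _ (mulx_lt' a ha) (mulx_lt' b hb)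

lemma iter_mod (k a : Nat) (ha : a < 32) : mulx^[k] a = mulx^[k % 31] a := by
  induction k using Nat.strong_induction_on with
  | _ k ih =>
    by_cases h : k < 31
    · rw [Nat.mod_eq_of_lt h]
    · have hk : k = 31 + (k - 31) := by omega
      rw [hk, Function.iterate_add_apply, mulx_per' _ (iter_lt (k - 31) a ha),
        ih (k - 31) (by omega)]
      congr 1
      omega

lemma iter_zero (k : Nat) : mulx^[k] 0 = 0 := by
  induction k with
  | zero => rfl
  | succ k ih => rw [Function.iterate_succ_apply]; simpa [mulx] using ih

-- A's char-level step equals the integer step (finite check)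
lemma Cfun_cons (c : Char) (bs : List Char) :
    Cfun (c :: bs) = mulx^[bs.length] (if c == '1' then 5 else 0) ^^^ Cfun bs := rfl

lemma crc5_step_key : ∀ n : Fin 32,
    ((if ('0' : Char) == (bits5 n.val).headD ' ' then (bits5 n.val).tail ++ ['0']
      else crc5Xor ((bits5 n.val).tail ++ ['0']) crc5G5) = bits5 (stepc n.val '0')
    ∧ (if ('1' : Char) == (bits5 n.val).headD ' ' then (bits5 n.val).tail ++ ['0']
      else crc5Xor ((bits5 n.val).tail ++ ['0']) crc5G5) = bits5 (stepc n.val '1')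
    ∧ stepc n.val '0' < 32 ∧ stepc n.val '1' < 32) := by decide

lemma crc5_loop_eq (data : List Char) : ∀ n : Nat, n < 32 →
    crc5Loop data (bits5 n) = bits5 (data.foldl stepc n)
    ∧ data.foldl stepc n < 32 := by
  induction data with
  | nil => intro n hn; exact ⟨rfl, hn⟩
  | cons c data ih =>
    intro n hn
    obtain ⟨h0, h1, b0, b1⟩ := crc5_step_key ⟨n, hn⟩
    rw [List.foldl_cons]
    by_cases hc0 : c = '0'
    · subst hc0
      have hstep : crc5Loop ('0' :: data) (bits5 n) = crc5Loop data (bits5 (stepc n '0')) := by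
        simp only [crc5Loop]; rw [if_neg (by decide), h0]
      rw [hstep]; exact ih _ b0
    · by_cases hc1 : c = '1'
      · subst hc1
        have hstep : crc5Loop ('1' :: data) (bits5 n) = crc5Loop data (bits5 (stepc n '1')) := by
          simp only [crc5Loop]; rw [if_neg (by decide), h1]
        rw [hstep]; exact ih _ b1
      · have hskip : stepc n c = n := by simp [stepc, hc0, hc1]
        have hstep : crc5Loop (c :: data) (bits5 n) = crc5Loop data (bits5 n) := by
          simp only [crc5Loop]; rw [if_pos ⟨hc0, hc1⟩]
        rw [hstep, hskip]; exact ih n hn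

-- skipping invalid characters = folding over the filtered list
lemma foldl_stepc_filter (data : List Char) : ∀ r : Nat,
    data.foldl stepc r = (data.filter (fun c => c == '0' || c == '1')).foldl stepb r := by
  induction data with
  | nil => intro r; rfl
  | cons c data ih =>
    intro r
    by_cases hc : c = '0' ∨ c = '1'
    · have hf : (c == '0' || c == '1') = true := by
        rcases hc with h | h <;> simp [h]
      have hs : stepc r c = stepb r c := by
        rcases hc with h | h <;> simp [stepc, stepb, h]
      simp [hf, hs, ih]
    · rw [not_or] at hc
      have hf : (c == '0' || c == '1') = false := by
        simp [hc.1, hc.2]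
      have hs : stepc r c = r := by simp [stepc, hc.1, hc.2]
      simp [hf, hs, ih]

-- closed form for the serial fold: linearity of the CRC in register and data
lemma foldl_stepb_closed (bits : List Char) : ∀ r : Nat, r < 32 →
    bits.foldl stepb r = mulx^[bits.length] r ^^^ Cfun bits ∧ Cfun bits < 32 := by
  induction bits with
  | nil => intro r hr; simp [Cfun]
  | cons c bs ih =>
    intro r hr
    have hv : (if c == '1' then 5 else 0) < 32 := by split <;> omega
    have hstep : stepb r c < 32 := xor_lt' _ _ (mulx_lt' r hr) hv
    obtain ⟨hfold, hC⟩ := ih (stepb r c) hstep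
    constructor
    · rw [List.foldl_cons, hfold]
      unfold stepb
      rw [iter_xor _ _ _ (mulx_lt' r hr) hv, ← Function.iterate_succ_apply]
      simp only [Cfun, List.length_cons, Nat.succ_eq_add_one, Nat.xor_assoc]
    · show mulx^[bs.length] (if c == '1' then 5 else 0) ^^^ Cfun bs < 32
      exact xor_lt' _ _ (iter_lt _ _ hv) hC

-- the table built by Source B's module-level loop holds the powers of x
lemma pow_table : ∀ k : Fin 31, crc5Pow.getD k.val 0 = mulx^[k.val] 1 := by decide

lemma pow_lookup (m : Nat) :
    PySem.List.pyGetD crc5Pow (PySem.Int.mod ((m : Nat) : Int) 31) 0 = mulx^[m] 1 := by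
  have h31 : ((31 : Nat) : Int) = (31 : Int) := by norm_num
  rw [← h31, PySem.Int.mod_natCast, PySem.List.pyGetD_natCast]
  rw [iter_mod m 1 (by omega)]
  exact pow_table ⟨m % 31, Nat.mod_lt _ (by omega)⟩

-- the enumerate fold accumulates exactly the data contribution Cfun
lemma enum_fold (n : Nat) (bs : List Char) : ∀ (s : Nat), s + bs.length = n → ∀ acc : Nat,
    (PySem.List.enumerate bs ((s : Nat) : Int)).foldl
      (fun reg ic => if ic.2 == '1'
        then reg ^^^ PySem.List.pyGetD crc5Pow (PySem.Int.mod (((n : Nat) : Int) + 4 - ic.1) 31) 0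
        else reg) acc
    = acc ^^^ Cfun bs := by
  induction bs with
  | nil => intro s hs acc; simp [PySem.List.enumerate_nil, Cfun]
  | cons c bs ih =>
    intro s hs acc
    rw [PySem.List.enumerate_cons, List.foldl_cons]
    have hcast : ((s : Nat) : Int) + 1 = (((s + 1 : Nat)) : Int) := by push_cast; ring
    have hidx : ((n : Nat) : Int) + 4 - ((s : Nat) : Int) = (((bs.length + 5 : Nat)) : Int) := by
      have : n = s + (bs.length + 1) := by simpa [List.length_cons] using hs.symm
      subst this; push_cast; ring
    have hs' : s + 1 + bs.length = n := by simp only [List.length_cons] at hs; omega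
    have hrec := ih (s + 1) hs'
    by_cases hc : c = '1'
    · subst hc
      simp only [show (('1' : Char) == '1') = true from rfl, if_true]
      rw [hidx, pow_lookup, hcast, hrec, Cfun_cons]
      have h5 : mulx^[bs.length] (if ('1' : Char) == '1' then 5 else 0) = mulx^[bs.length + 5] 1 := by
        rw [Function.iterate_add_apply]
        congr 1
      rw [h5, Nat.xor_assoc]
    · have hcb : (c == '1') = false := by simpa using hc
      simp only [hcb]
      rw [hcast, hrec, Cfun_cons, hcb]
      simp [iter_zero]

-- the init fold produces x^n * 0x1F
lemma init_fold (n : Nat) :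
    (PySem.List.pyRange 0 5 1).foldl
      (fun reg j => reg ^^^ PySem.List.pyGetD crc5Pow (PySem.Int.mod (((n : Nat) : Int) + j) 31) 0) 0
    = mulx^[n] 31 := by
  have hr : PySem.List.pyRange 0 5 1 = [0, 1, 2, 3, 4] := by decide
  rw [hr]
  simp only [List.foldl_cons, List.foldl_nil]
  have h0 : ((n : Nat) : Int) + 0 = ((n : Nat) : Int) := by ring
  have h1 : ((n : Nat) : Int) + 1 = (((n + 1 : Nat)) : Int) := by push_cast; ring
  have h2 : ((n : Nat) : Int) + 2 = (((n + 2 : Nat)) : Int) := by push_cast; ring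
  have h3 : ((n : Nat) : Int) + 3 = (((n + 3 : Nat)) : Int) := by push_cast; ring
  have h4 : ((n : Nat) : Int) + 4 = (((n + 4 : Nat)) : Int) := by push_cast; ring
  rw [h0, h1, h2, h3, h4, pow_lookup, pow_lookup, pow_lookup, pow_lookup, pow_lookup]
  have e1 : mulx^[n+1] 1 = mulx^[n] 2 := by
    rw [Function.iterate_add_apply]; congr 1
  have e2 : mulx^[n+2] 1 = mulx^[n] 4 := by
    rw [Function.iterate_add_apply]; congr 1
  have e3 : mulx^[n+3] 1 = mulx^[n] 8 := by
    rw [Function.iterate_add_apply]; congr 1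
  have e4 : mulx^[n+4] 1 = mulx^[n] 16 := by
    rw [Function.iterate_add_apply]; congr 1
  rw [e1, e2, e3, e4, Nat.zero_xor]
  rw [← iter_xor n 1 2 (by omega) (by omega), show (1 ^^^ 2 : Nat) = 3 from rfl]
  rw [← iter_xor n 3 4 (by omega) (by omega), show (3 ^^^ 4 : Nat) = 7 from rfl]
  rw [← iter_xor n 7 8 (by omega) (by omega), show (7 ^^^ 8 : Nat) = 15 from rfl]
  rw [← iter_xor n 15 16 (by omega) (by omega), show (15 ^^^ 16 : Nat) = 31 from rfl]

-- the two final renderings agree on every 5-bit register value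
lemma crc5_final_eq : ∀ m : Fin 32,
    String.ofList ((bits5 m.val).foldl (fun acc nextb => acc ++ [Char.ofNat (nextb.toNat ^^^ 1)]) []) =
    String.ofList ((PySem.List.pyRange 4 (-1) (-1)).map
      (fun i => if ((m.val ^^^ 0x1F) >>> i.toNat) &&& 1 == 1 then '1' else '0')) := by decide

-- ===== VERDICT (by name: the statement is the Claim_ definition above) =====
theorem crc5_spec : Claim_equal_crc5 := by
  intro bitstring _
  unfold Spec_crc5
  show crc5 bitstring = crc5_alt bitstring
  have hinit : (['1', '1', '1', '1', '1'] : List Char) = bits5 31 := by decide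
  obtain ⟨heq, hlt⟩ := crc5_loop_eq bitstring.toList 31 (by norm_num)
  rw [foldl_stepc_filter] at heq hlt
  obtain ⟨hclosed, hC⟩ :=
    foldl_stepb_closed (bitstring.toList.filter (fun c => c == '0' || c == '1')) 31 (by norm_num)
  rw [hclosed] at heq hlt
  have hreg := enum_fold (bitstring.toList.filter (fun c => c == '0' || c == '1')).length
    (bitstring.toList.filter (fun c => c == '0' || c == '1')) 0 (by omega)
    (mulx^[(bitstring.toList.filter (fun c => c == '0' || c == '1')).length] 31)
  simp only [Nat.cast_zero] at hreg
  have hfin := crc5_final_eq ⟨_, hlt⟩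
  unfold crc5 crc5_alt
  simp only [hinit, heq, init_fold, hreg]
  exact hfin
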